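-- pv_equiv track=rewrite | github.com/siliconcompiler/siliconcompiler | siliconcompiler/utils.py | format_fileset_type_table
-- ===== SOURCE A (Python) =====
-- def get_default_iomap():
--     """
--     Default input file map for SC with filesets and extensions
--     """
--
--     # Record extensions:
--
--     # High level languages
--     hll_c = ('c', 'cc', 'cpp', 'c++', 'cp', 'cxx', 'hpp')
--     hll_bsv = ('bsv',)
--     hll_scala = ('scala',)
--     hll_python = ('py',)
--
--     config_chisel = ('sbt',)
--
--     # Register transfer languages
--     rtl_verilog = ('v', 'sv', 'verilog')
--     rtl_vhdl = ('vhd', 'vhdl')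
--
--     # Timing libraries
--     timing_liberty = ('lib', 'ccs')
--
--     # Layout
--     layout_def = ('def',)
--     layout_lef = ('lef',)
--     layout_gds = ('gds', 'gds2', 'gdsii')
--     layout_oas = ('oas', 'oasis')
--     layout_gerber = ('gbr', 'gerber')
--     layout_odb = ('odb',)
--
--     # Netlist
--     netlist_cdl = ('cdl',)
--     netlist_sp = ('sp', 'spice')
--     netlist_verilog = ('vg',)
--
--     # Waveform
--     waveform_vcd = ('vcd',)
--
--     # Constraint
--     constraint_sdc = ('sdc', )
--     constraint_upf = ('upf', )
--
--     # FPGA constraints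
--     fpga_xdc = ('xdc',)
--     fpga_pcf = ('pcf',)
--
--     # Build default map with fileset and type
--     default_iomap = {}
--     default_iomap.update({ext: ('hll', 'c') for ext in hll_c})
--     default_iomap.update({ext: ('hll', 'bsv') for ext in hll_bsv})
--     default_iomap.update({ext: ('hll', 'scala') for ext in hll_scala})
--     default_iomap.update({ext: ('hll', 'python') for ext in hll_python})
--     default_iomap.update({ext: ('config', 'chisel') for ext in config_chisel})
--
--     default_iomap.update({ext: ('rtl', 'verilog') for ext in rtl_verilog})
--     default_iomap.update({ext: ('rtl', 'vhdl') for ext in rtl_vhdl})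
--
--     default_iomap.update({ext: ('timing', 'liberty') for ext in timing_liberty})
--
--     default_iomap.update({ext: ('layout', 'def') for ext in layout_def})
--     default_iomap.update({ext: ('layout', 'lef') for ext in layout_lef})
--     default_iomap.update({ext: ('layout', 'gds') for ext in layout_gds})
--     default_iomap.update({ext: ('layout', 'oas') for ext in layout_oas})
--     default_iomap.update({ext: ('layout', 'gerber') for ext in layout_gerber})
--     default_iomap.update({ext: ('layout', 'odb') for ext in layout_odb})
--
--     default_iomap.update({ext: ('netlist', 'cdl') for ext in netlist_cdl})
--     default_iomap.update({ext: ('netlist', 'sp') for ext in netlist_sp})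
--     default_iomap.update({ext: ('netlist', 'verilog') for ext in netlist_verilog})
--
--     default_iomap.update({ext: ('waveform', 'vcd') for ext in waveform_vcd})
--
--     default_iomap.update({ext: ('constraint', 'sdc') for ext in constraint_sdc})
--     default_iomap.update({ext: ('constraint', 'upf') for ext in constraint_upf})
--
--     default_iomap.update({ext: ('fpga', 'xdc') for ext in fpga_xdc})
--     default_iomap.update({ext: ('fpga', 'pcf') for ext in fpga_pcf})
--
--     return default_iomap
--
-- def format_fileset_type_table(indent=12):
--     '''
--     Generate a table to use in the __doc__ of the input function which auto
--     updates based on the iomap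
--     '''
--     table = "filetype  | fileset    | suffix (case insensitive)\n"
--     indent = " " * indent
--     table += f"{indent}----------|------------|---------------------------------------------\n"
--
--     iobytype = {}
--     for ext, settype in get_default_iomap().items():
--         fileset, filetype = settype
--         iobytype.setdefault((fileset, filetype), []).append(ext)
--
--     for settype, exts in iobytype.items():
--         fileset, filetype = settype
--         ext = ",".join(exts)
--         table += f"{indent}{filetype:<10}| {fileset:<11}| {ext}\n"
--
--     return table
-- ===== SOURCE B (Python) =====
-- # The table apart from the indent is a compile-time constant, so B keeps the rows
-- # pre-rendered as literal strings and only prefixes the indent: no iomap, no dict,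
-- # no formatting at call time.
-- _ROWS = [
--     'c         | hll        | c,cc,cpp,c++,cp,cxx,hpp',
--     'bsv       | hll        | bsv',
--     'scala     | hll        | scala',
--     'python    | hll        | py',
--     'chisel    | config     | sbt',
--     'verilog   | rtl        | v,sv,verilog',
--     'vhdl      | rtl        | vhd,vhdl',
--     'liberty   | timing     | lib,ccs',
--     'def       | layout     | def',
--     'lef       | layout     | lef',
--     'gds       | layout     | gds,gds2,gdsii',
--     'oas       | layout     | oas,oasis',
--     'gerber    | layout     | gbr,gerber',
--     'odb       | layout     | odb',
--     'cdl       | netlist    | cdl',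
--     'sp        | netlist    | sp,spice',
--     'verilog   | netlist    | vg',
--     'vcd       | waveform   | vcd',
--     'sdc       | constraint | sdc',
--     'upf       | constraint | upf',
--     'xdc       | fpga       | xdc',
--     'pcf       | fpga       | pcf',
-- ]
--
-- _HEADER = "filetype  | fileset    | suffix (case insensitive)"
-- _RULE = "----------|------------|---------------------------------------------"
--
--
-- def format_fileset_type_table(indent=12):
--     pad = " " * indent
--     return "\n".join([_HEADER, pad + _RULE] + [pad + r for r in _ROWS]) + "\n"
-- ===== Notes on version B (the rewrite author's own statement) =====
-- stated objective: simpler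
-- what changed: The table is constant except for the indent, so B keeps the rows as pre-rendered string literals and joins them with the indent prefix, removing A's iomap dict construction, the setdefault regrouping pass and all runtime formatting.
import Mathlib
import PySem

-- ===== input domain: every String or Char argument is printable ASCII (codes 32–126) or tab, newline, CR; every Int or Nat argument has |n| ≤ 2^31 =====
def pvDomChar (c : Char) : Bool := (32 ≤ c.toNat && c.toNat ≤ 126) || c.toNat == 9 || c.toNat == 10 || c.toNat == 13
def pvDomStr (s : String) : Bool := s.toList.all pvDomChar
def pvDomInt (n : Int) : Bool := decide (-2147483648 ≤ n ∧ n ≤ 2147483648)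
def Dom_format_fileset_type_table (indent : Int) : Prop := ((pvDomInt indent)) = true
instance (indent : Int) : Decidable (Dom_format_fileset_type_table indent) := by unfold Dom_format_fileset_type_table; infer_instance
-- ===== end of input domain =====

-- B: the table apart from the indent is constant, so B keeps the rows pre-rendered as
-- string literals and only prefixes the indent (objective: simpler; no iomap, no dict).

-- ===== PORT A =====
-- left-justify to width w with spaces: exact port of f"{s:<w}" for our ASCII strings
def pvLjust (s : List Char) (w : Nat) : List Char := s ++ List.replicate (w - s.length) ' '

-- helper get_default_iomap: each `default_iomap.update({ext: (fs, ft) for ext in exts})`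
-- is a fold inserting every ext of the tuple with that (fileset, filetype) value
def pvA_update (d : PySem.Dict (List Char) (List Char × List Char)) (exts : List (List Char))
    (v : List Char × List Char) : PySem.Dict (List Char) (List Char × List Char) :=
  exts.foldl (fun d e => d.insert e v) d

def get_default_iomap_A : PySem.Dict (List Char) (List Char × List Char) :=
  let hll_c := ["c".toList, "cc".toList, "cpp".toList, "c++".toList, "cp".toList, "cxx".toList, "hpp".toList]
  let hll_bsv := ["bsv".toList]
  let hll_scala := ["scala".toList]
  let hll_python := ["py".toList]
  let config_chisel := ["sbt".toList]
  let rtl_verilog := ["v".toList, "sv".toList, "verilog".toList]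
  let rtl_vhdl := ["vhd".toList, "vhdl".toList]
  let timing_liberty := ["lib".toList, "ccs".toList]
  let layout_def := ["def".toList]
  let layout_lef := ["lef".toList]
  let layout_gds := ["gds".toList, "gds2".toList, "gdsii".toList]
  let layout_oas := ["oas".toList, "oasis".toList]
  let layout_gerber := ["gbr".toList, "gerber".toList]
  let layout_odb := ["odb".toList]
  let netlist_cdl := ["cdl".toList]
  let netlist_sp := ["sp".toList, "spice".toList]
  let netlist_verilog := ["vg".toList]
  let waveform_vcd := ["vcd".toList]
  let constraint_sdc := ["sdc".toList]
  let constraint_upf := ["upf".toList]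
  let fpga_xdc := ["xdc".toList]
  let fpga_pcf := ["pcf".toList]
  let d := PySem.Dict.empty
  let d := pvA_update d hll_c ("hll".toList, "c".toList)
  let d := pvA_update d hll_bsv ("hll".toList, "bsv".toList)
  let d := pvA_update d hll_scala ("hll".toList, "scala".toList)
  let d := pvA_update d hll_python ("hll".toList, "python".toList)
  let d := pvA_update d config_chisel ("config".toList, "chisel".toList)
  let d := pvA_update d rtl_verilog ("rtl".toList, "verilog".toList)
  let d := pvA_update d rtl_vhdl ("rtl".toList, "vhdl".toList)
  let d := pvA_update d timing_liberty ("timing".toList, "liberty".toList)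
  let d := pvA_update d layout_def ("layout".toList, "def".toList)
  let d := pvA_update d layout_lef ("layout".toList, "lef".toList)
  let d := pvA_update d layout_gds ("layout".toList, "gds".toList)
  let d := pvA_update d layout_oas ("layout".toList, "oas".toList)
  let d := pvA_update d layout_gerber ("layout".toList, "gerber".toList)
  let d := pvA_update d layout_odb ("layout".toList, "odb".toList)
  let d := pvA_update d netlist_cdl ("netlist".toList, "cdl".toList)
  let d := pvA_update d netlist_sp ("netlist".toList, "sp".toList)
  let d := pvA_update d netlist_verilog ("netlist".toList, "verilog".toList)
  let d := pvA_update d waveform_vcd ("waveform".toList, "vcd".toList)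
  let d := pvA_update d constraint_sdc ("constraint".toList, "sdc".toList)
  let d := pvA_update d constraint_upf ("constraint".toList, "upf".toList)
  let d := pvA_update d fpga_xdc ("fpga".toList, "xdc".toList)
  let d := pvA_update d fpga_pcf ("fpga".toList, "pcf".toList)
  d

-- the grouping loop of A: iobytype.setdefault((fileset, filetype), []).append(ext)
def pvA_iobytype : PySem.Dict (List Char × List Char) (List (List Char)) :=
  (get_default_iomap_A).items.foldl (fun d p => d.modify p.2 [] (· ++ [p.1])) PySem.Dict.empty

def format_fileset_type_table (indent : Int) : String :=
  let table := "filetype  | fileset    | suffix (case insensitive)\n".toList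
  let ind := PySem.List.pyRepeat [' '] indent
  let table := table ++ (ind ++ "----------|------------|---------------------------------------------\n".toList)
  let table := pvA_iobytype.items.foldl
    (fun t p =>
      t ++ (ind ++ pvLjust p.1.2 10 ++ "| ".toList ++ pvLjust p.1.1 11 ++ "| ".toList
              ++ PySem.Chars.join [','] p.2 ++ "\n".toList)) table
  String.mk table

-- ===== PORT B =====
-- pre-rendered constant rows (filetype | fileset | suffixes), exactly Source B's _ROWS
def pvRows : List (List Char) :=
  [ "c         | hll        | c,cc,cpp,c++,cp,cxx,hpp".toList,
    "bsv       | hll        | bsv".toList,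
    "scala     | hll        | scala".toList,
    "python    | hll        | py".toList,
    "chisel    | config     | sbt".toList,
    "verilog   | rtl        | v,sv,verilog".toList,
    "vhdl      | rtl        | vhd,vhdl".toList,
    "liberty   | timing     | lib,ccs".toList,
    "def       | layout     | def".toList,
    "lef       | layout     | lef".toList,
    "gds       | layout     | gds,gds2,gdsii".toList,
    "oas       | layout     | oas,oasis".toList,
    "gerber    | layout     | gbr,gerber".toList,
    "odb       | layout     | odb".toList,
    "cdl       | netlist    | cdl".toList,
    "sp        | netlist    | sp,spice".toList,
    "verilog   | netlist    | vg".toList,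
    "vcd       | waveform   | vcd".toList,
    "sdc       | constraint | sdc".toList,
    "upf       | constraint | upf".toList,
    "xdc       | fpga       | xdc".toList,
    "pcf       | fpga       | pcf".toList ]

def pvHeader : List Char := "filetype  | fileset    | suffix (case insensitive)".toList
def pvRule : List Char := "----------|------------|---------------------------------------------".toList

-- "\n".join([_HEADER, pad + _RULE] + [pad + r for r in _ROWS]) + "\n"
def format_fileset_type_table_alt (indent : Int) : String :=
  let pad := PySem.List.pyRepeat [' '] indent
  String.mk (PySem.Chars.join ['\n'] ([pvHeader, pad ++ pvRule] ++ pvRows.map (fun r => pad ++ r)) ++ ['\n'])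

-- ===== PRECONDITION & SPEC =====
def Spec_format_fileset_type_table (indent : Int) (out : String) : Prop := out = format_fileset_type_table_alt indent
instance (indent : Int) (out : String) : Decidable (Spec_format_fileset_type_table indent out) := by unfold Spec_format_fileset_type_table; infer_instance

-- ===== CLAIM (what is proved, stated in full; the proofs are below) =====
def Claim_equal_format_fileset_type_table : Prop := ∀ (indent : Int), Dom_format_fileset_type_table indent → Spec_format_fileset_type_table indent (format_fileset_type_table indent)

-- ===== LEMMAS AND PROOFS =====
-- A's grouping dict, fully evaluated (closed data): key (fileset, filetype) with its extensions
set_option maxRecDepth 10000 in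
lemma pvA_iobytype_items : pvA_iobytype.items =
  [ (("hll".toList, "c".toList), ["c".toList, "cc".toList, "cpp".toList, "c++".toList, "cp".toList, "cxx".toList, "hpp".toList]),
    (("hll".toList, "bsv".toList), ["bsv".toList]),
    (("hll".toList, "scala".toList), ["scala".toList]),
    (("hll".toList, "python".toList), ["py".toList]),
    (("config".toList, "chisel".toList), ["sbt".toList]),
    (("rtl".toList, "verilog".toList), ["v".toList, "sv".toList, "verilog".toList]),
    (("rtl".toList, "vhdl".toList), ["vhd".toList, "vhdl".toList]),
    (("timing".toList, "liberty".toList), ["lib".toList, "ccs".toList]),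
    (("layout".toList, "def".toList), ["def".toList]),
    (("layout".toList, "lef".toList), ["lef".toList]),
    (("layout".toList, "gds".toList), ["gds".toList, "gds2".toList, "gdsii".toList]),
    (("layout".toList, "oas".toList), ["oas".toList, "oasis".toList]),
    (("layout".toList, "gerber".toList), ["gbr".toList, "gerber".toList]),
    (("layout".toList, "odb".toList), ["odb".toList]),
    (("netlist".toList, "cdl".toList), ["cdl".toList]),
    (("netlist".toList, "sp".toList), ["sp".toList, "spice".toList]),
    (("netlist".toList, "verilog".toList), ["vg".toList]),
    (("waveform".toList, "vcd".toList), ["vcd".toList]),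
    (("constraint".toList, "sdc".toList), ["sdc".toList]),
    (("constraint".toList, "upf".toList), ["upf".toList]),
    (("fpga".toList, "xdc".toList), ["xdc".toList]),
    (("fpga".toList, "pcf".toList), ["pcf".toList]) ] := by decide

-- both sides reduced over the concrete data, a symbolic indent string threaded through
set_option maxRecDepth 10000 in
lemma pv_main (ind : List Char) :
    (pvA_iobytype.items.foldl
      (fun t p =>
        t ++ (ind ++ pvLjust p.1.2 10 ++ "| ".toList ++ pvLjust p.1.1 11 ++ "| ".toList
                ++ PySem.Chars.join [','] p.2 ++ "\n".toList))
      ("filetype  | fileset    | suffix (case insensitive)\n".toList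
        ++ (ind ++ "----------|------------|---------------------------------------------\n".toList)))
    = PySem.Chars.join ['\n'] ([pvHeader, ind ++ pvRule] ++ pvRows.map (fun r => ind ++ r)) ++ ['\n'] := by
  rw [pvA_iobytype_items]
  simp [pvRows, pvHeader, pvRule, pvLjust, PySem.Chars.join, List.intercalate,
    List.intersperse, List.append_assoc]

-- ===== VERDICT (by name: the statement is the Claim_ definition above) =====
theorem format_fileset_type_table_spec : Claim_equal_format_fileset_type_table := by
  intro indent _
  unfold Spec_format_fileset_type_table format_fileset_type_table format_fileset_type_table_alt
  exact congrArg String.mk (pv_main (PySem.List.pyRepeat [' '] indent))
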